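-- pv_equiv track=rewrite | github.com/chakraa1/Data-Structures-and-Algorithms | Hashing/SubarrayWithDistinctCount.py | SubarrayDistinctCount
-- ===== SOURCE A (Python) =====
-- def SubarrayDistinctCount(A,K):
--     ans = []
--     n = len(A)
--     for i in range(n - K + 1):
--         distinct_elements = set()
--         for j in range(i,i + K):
--             distinct_elements.add(A[j])
--         ans.append(len(distinct_elements))
--     return ans
-- ===== SOURCE B (Python) =====
-- def SubarrayDistinctCount(A, K):
--     n = len(A)
--     if K <= 0:
--         # every "window" of non-positive size is empty: 0 distinct elements each
--         return [0] * (n - K + 1)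
--     ans = []
--     freq = {}
--     distinct = 0
--     for j in range(n):
--         x = A[j]
--         freq[x] = freq.get(x, 0) + 1
--         if freq[x] == 1:
--             distinct += 1
--         if j >= K:
--             y = A[j - K]
--             freq[y] -= 1
--             if freq[y] == 0:
--                 distinct -= 1
--         if j >= K - 1:
--             ans.append(distinct)
--     return ans
-- ===== Notes on version B (the rewrite author's own statement) =====
-- stated objective: faster
-- what changed: Replaces the per-window set rebuild (a fresh set over each length-K slice) with a single sliding-window pass that maintains a frequency dict and a running distinct counter, adding the entering element and removing the leaving one.
import Mathlib
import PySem

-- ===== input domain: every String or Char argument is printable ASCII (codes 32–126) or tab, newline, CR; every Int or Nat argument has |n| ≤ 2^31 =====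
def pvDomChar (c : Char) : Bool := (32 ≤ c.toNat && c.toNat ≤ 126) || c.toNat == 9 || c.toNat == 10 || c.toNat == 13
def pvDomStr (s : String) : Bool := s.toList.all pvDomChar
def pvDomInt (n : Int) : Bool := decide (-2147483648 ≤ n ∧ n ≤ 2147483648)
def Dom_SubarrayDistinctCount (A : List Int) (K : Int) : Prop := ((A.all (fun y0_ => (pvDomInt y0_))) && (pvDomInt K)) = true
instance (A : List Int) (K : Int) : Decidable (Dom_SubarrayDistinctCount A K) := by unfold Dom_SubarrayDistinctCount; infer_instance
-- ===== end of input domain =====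

-- B replaces A's per-window set rebuild with one sliding-window pass (frequency dict + running
-- distinct counter); objective: faster (O(n*K) -> O(n)).


-- ===== PORT A =====
-- literal transliteration of A: for each window start i, build a fresh set of its K elements
def SubarrayDistinctCount (A : List Int) (K : Int) : List Int :=
  let n : Int := A.length
  (PySem.List.pyRange 0 (n - K + 1) 1).foldl
    (fun ans i =>
      let s := (PySem.List.pyRange i (i + K) 1).foldl
        (fun s j => PySem.Set.add s (PySem.List.pyGetD A j 0)) PySem.Set.empty
      ans ++ [PySem.Set.len s])
    []

-- ===== PORT B =====
-- one step of B's sliding-window loop body (index j): add A[j], drop A[j-K], record the count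
def pvStepB (A : List Int) (K : Int)
    (st : PySem.Dict Int Int × Int × List Int) (j : Int) :
    PySem.Dict Int Int × Int × List Int :=
  let x := PySem.List.pyGetD A j 0
  let freq := st.1.insert x (st.1.getD x 0 + 1)
  let distinct := if freq.getD x 0 = 1 then st.2.1 + 1 else st.2.1
  let fd : PySem.Dict Int Int × Int :=
    if K ≤ j then
      let y := PySem.List.pyGetD A (j - K) 0
      let freq' := freq.insert y (freq.getD y 0 - 1)
      (freq', if freq'.getD y 0 = 0 then distinct - 1 else distinct)
    else (freq, distinct)
  let ans := if K - 1 ≤ j then st.2.2 ++ [fd.2] else st.2.2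
  (fd.1, fd.2, ans)

def SubarrayDistinctCount_alt (A : List Int) (K : Int) : List Int :=
  let n : Int := A.length
  if K ≤ 0 then List.replicate (n - K + 1).toNat 0
  else
    ((PySem.List.pyRange 0 n 1).foldl (pvStepB A K) (PySem.Dict.empty, 0, [])).2.2

-- ===== PRECONDITION & SPEC =====
def Spec_SubarrayDistinctCount (A : List Int) (K : Int) (out : List Int) : Prop := out = SubarrayDistinctCount_alt A K
instance (A : List Int) (K : Int) (out : List Int) : Decidable (Spec_SubarrayDistinctCount A K out) := by unfold Spec_SubarrayDistinctCount; infer_instance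

-- ===== CLAIM (what is proved, stated in full; the proofs are below) =====
def Claim_equal_SubarrayDistinctCount : Prop := ∀ (A : List Int) (K : Int), Dom_SubarrayDistinctCount A K → Spec_SubarrayDistinctCount A K (SubarrayDistinctCount A K)

-- ===== LEMMAS AND PROOFS =====

-- the common specification: one distinct-element count per window start
def pvSpec (A : List Int) (K : Int) : List Int :=
  (PySem.List.pyRange 0 ((A.length : Int) - K + 1) 1).map
    (fun i => (((A.drop i.toNat).take K.toNat).toFinset.card : Int))

theorem pvLenOfList (w : List Int) : PySem.Set.len (PySem.Set.ofList w) = (w.toFinset.card : Int) := by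
  have nd := PySem.Set.nodup_ofList (xs := w)
  have hfs : (PySem.Set.ofList w).toFinset = w.toFinset := by
    ext x; simp [List.mem_toFinset, PySem.Set.mem_ofList]
  have : (PySem.Set.ofList w).length = w.toFinset.card := by
    rw [← List.toFinset_card_of_nodup nd, hfs]
  rw [show PySem.Set.len (PySem.Set.ofList w) = ((PySem.Set.ofList w).length : Int) from rfl, this]

theorem pvWindowMap (A : List Int) (a b : Int) (ha : 0 ≤ a) (hb : b ≤ A.length) :
    (PySem.List.pyRange a b 1).map (fun j => PySem.List.pyGetD A j 0)
      = (A.drop a.toNat).take (b - a).toNat := by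
  by_cases h : b ≤ a
  · rw [PySem.List.pyRange_one_eq_nil h]
    have : (b - a).toNat = 0 := by omega
    simp [this]
  · have hab : a ≤ b := le_of_lt (lt_of_not_ge h)
    have hsplit := PySem.List.pyRange_one_append a b (A.length : Int) hab hb
    have hfull := PySem.List.map_pyGetD_pyRange A 0 ha
    rw [show PySem.List.len A = (A.length : Int) from by simp [PySem.List.len_eq], hsplit,
      List.map_append] at hfull
    have hlen : ((PySem.List.pyRange a b 1).map (fun j => PySem.List.pyGetD A j 0)).length
        = (b - a).toNat := by simp [PySem.List.length_pyRange_one]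
    calc (PySem.List.pyRange a b 1).map (fun j => PySem.List.pyGetD A j 0)
        = (((PySem.List.pyRange a b 1).map (fun j => PySem.List.pyGetD A j 0))
            ++ ((PySem.List.pyRange b (A.length : Int) 1).map (fun j => PySem.List.pyGetD A j 0))).take ((b - a).toNat) := by
          rw [List.take_append_of_le_length (by omega)]
          rw [List.take_of_length_le (by omega)]
      _ = (A.drop a.toNat).take (b - a).toNat := by rw [← hfull]

theorem pvA_eq_spec (A : List Int) (K : Int) :
    SubarrayDistinctCount A K = pvSpec A K := by
  unfold SubarrayDistinctCount pvSpec
  rw [PySem.List.foldl_append_singleton_eq_map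
    (fun i => PySem.Set.len ((PySem.List.pyRange i (i + K) 1).foldl
        (fun s j => PySem.Set.add s (PySem.List.pyGetD A j 0)) PySem.Set.empty))]
  rw [List.nil_append]
  apply List.map_congr_left
  intro i hi
  rw [PySem.List.mem_pyRange_one] at hi
  have hfold : (PySem.List.pyRange i (i + K) 1).foldl
      (fun s j => PySem.Set.add s (PySem.List.pyGetD A j 0)) PySem.Set.empty
      = PySem.Set.ofList ((PySem.List.pyRange i (i + K) 1).map (fun j => PySem.List.pyGetD A j 0)) := by
    rw [PySem.Set.ofList_eq_foldl, List.foldl_map]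
    rfl
  rw [hfold, pvWindowMap A i (i + K) hi.1 (by omega), show i + K - i = K by ring, pvLenOfList]

-- the window of B's dict after the first m indices: the last (at most K) of the first m elements
def pvSeg (A : List Int) (Kn m : Nat) : List Int := (A.take m).drop (m - Kn)
def pvF (A : List Int) (Kn : Nat) (i : Nat) : Int := (((A.drop i).take Kn).toFinset.card : Int)

-- loop invariant of B: freq holds the window's multiplicities, distinct its number of
-- distinct elements, ans the answers of all completed windows
theorem pvB_inv (A : List Int) (K : Int) (hK : 1 ≤ K) (m : Nat) (hm : m ≤ A.length) :
    ∃ freq : PySem.Dict Int Int,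
      (PySem.List.pyRange 0 (m : Int) 1).foldl (pvStepB A K) (PySem.Dict.empty, 0, [])
        = (freq, ((pvSeg A K.toNat m).toFinset.card : Int),
            (List.range (m + 1 - K.toNat)).map (pvF A K.toNat))
      ∧ ∀ x, freq.getD x 0 = ((pvSeg A K.toNat m).count x : Int) := by
  induction m with
  | zero =>
    refine ⟨PySem.Dict.empty, ?_, ?_⟩
    · rw [show ((0 : Nat) : Int) = 0 from rfl, PySem.List.pyRange_one_eq_nil le_rfl]
      have h1 : pvSeg A K.toNat 0 = [] := by simp [pvSeg]
      have h2 : 0 + 1 - K.toNat = 0 := by omega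
      simp [h1, h2]
    · intro x
      simp [pvSeg, PySem.Dict.getD_empty]
  | succ m ih =>
    have hm' : m ≤ A.length := by omega
    obtain ⟨freq, hfold, hfreq⟩ := ih hm'
    have hmlt : m < A.length := by omega
    -- split off the last index
    have hrange : PySem.List.pyRange 0 ((m + 1 : Nat) : Int) 1
        = PySem.List.pyRange 0 (m : Int) 1 ++ [(m : Int)] := by
      push_cast
      exact PySem.List.pyRange_one_succ_right (by positivity)
    rw [hrange, List.foldl_append, List.foldl_cons, List.foldl_nil, hfold]
    have hx : PySem.List.pyGetD A (m : Int) 0 = A[m] := by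
      rw [PySem.List.pyGetD_eq_getElem A 0 (by positivity) (by exact_mod_cast hmlt)]; simp
    have hmid : pvSeg A K.toNat m ++ [A[m]] = (A.take (m + 1)).drop (m - K.toNat) := by
      rw [List.take_add_one, List.getElem?_eq_getElem hmlt]
      rw [List.drop_append_of_le_length (by simp; omega)]
      rfl
    have hcount_mid : ∀ z, (pvSeg A K.toNat m ++ [A[m]]).count z
        = (pvSeg A K.toNat m).count z + (if z = A[m] then 1 else 0) := by
      intro z
      rw [List.count_append, List.count_singleton]
      by_cases hz : z = A[m]
      · simp [hz]
      · simp [hz, Ne.symm hz]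
    -- the dict after freq[x] += 1
    have hfreq1 : ∀ z, ((freq.insert A[m] (freq.getD A[m] 0 + 1)).getD z 0)
        = ((pvSeg A K.toNat m ++ [A[m]]).count z : Int) := by
      intro z
      rw [PySem.Dict.getD_insert, hcount_mid z]
      by_cases hz : z = A[m]
      · simp [hz, hfreq A[m]]
      · simp [hz, hfreq z]
    -- distinct after the increment
    have hdist1 : (if (freq.insert A[m] (freq.getD A[m] 0 + 1)).getD A[m] 0 = 1
          then ((pvSeg A K.toNat m).toFinset.card : Int) + 1
          else ((pvSeg A K.toNat m).toFinset.card : Int))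
        = (((pvSeg A K.toNat m ++ [A[m]]).toFinset.card : Nat) : Int) := by
      have hfs : (pvSeg A K.toNat m ++ [A[m]]).toFinset = insert A[m] (pvSeg A K.toNat m).toFinset := by
        simp [List.toFinset_append]
      rw [hfreq1 A[m], hcount_mid A[m]]
      by_cases hmem : A[m] ∈ pvSeg A K.toNat m
      · have hc : (pvSeg A K.toNat m).count A[m] ≠ 0 := by
          simpa [List.count_eq_zero] using hmem
        rw [if_neg (by push_cast; omega), hfs, Finset.insert_eq_self.mpr (by simp [hmem])]
      · have hc : (pvSeg A K.toNat m).count A[m] = 0 := List.count_eq_zero.mpr hmem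
        rw [if_pos (by rw [hc]; norm_num), hfs,
          Finset.card_insert_of_notMem (by simp [hmem]), Nat.cast_add, Nat.cast_one]
    -- now assemble, splitting on whether an element leaves the window
    dsimp only [pvStepB]
    rw [hx]
    by_cases hKm : K ≤ (m : Int)
    · -- element A[m - K] leaves the window
      have hKnm : K.toNat ≤ m := by omega
      have hy : PySem.List.pyGetD A ((m : Int) - K) 0 = A[m - K.toNat] := by
        rw [show (m : Int) - K = ((m - K.toNat : Nat) : Int) by omega, PySem.List.pyGetD_natCast,
          List.getD_eq_getElem _ _ (by omega)]
      have hcons : pvSeg A K.toNat m ++ [A[m]] = A[m - K.toNat] :: pvSeg A K.toNat (m + 1) := by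
        rw [hmid, List.drop_eq_getElem_cons (by simp; omega)]
        congr 1
        · exact List.getElem_take
        · simp [pvSeg]
          congr 1
          omega
      have hfreq2 : ∀ z,
          (((freq.insert A[m] (freq.getD A[m] 0 + 1)).insert A[m - K.toNat]
              ((freq.insert A[m] (freq.getD A[m] 0 + 1)).getD A[m - K.toNat] 0 - 1)).getD z 0)
            = ((pvSeg A K.toNat (m + 1)).count z : Int) := by
        intro z
        rw [PySem.Dict.getD_insert]
        by_cases hz : z = A[m - K.toNat]
        · rw [if_pos hz, hfreq1, hcons, hz, List.count_cons_self]
          push_cast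
          ring
        · rw [if_neg hz, hfreq1, hcons]
          congr 1
          rw [List.count_cons]
          have hz' : A[m - K.toNat] ≠ z := fun h => hz h.symm
          simp [hz']
      have hdist2 :
          (if ((freq.insert A[m] (freq.getD A[m] 0 + 1)).insert A[m - K.toNat]
                ((freq.insert A[m] (freq.getD A[m] 0 + 1)).getD A[m - K.toNat] 0 - 1)).getD
                A[m - K.toNat] 0 = 0
            then (((pvSeg A K.toNat m ++ [A[m]]).toFinset.card : Nat) : Int) - 1
            else (((pvSeg A K.toNat m ++ [A[m]]).toFinset.card : Nat) : Int))
          = ((pvSeg A K.toNat (m + 1)).toFinset.card : Int) := by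
        rw [hfreq2]
        have hfs2 : (pvSeg A K.toNat m ++ [A[m]]).toFinset
            = insert A[m - K.toNat] (pvSeg A K.toNat (m + 1)).toFinset := by
          rw [hcons, List.toFinset_cons]
        by_cases hmem : A[m - K.toNat] ∈ pvSeg A K.toNat (m + 1)
        · have hc : (pvSeg A K.toNat (m + 1)).count A[m - K.toNat] ≠ 0 := by
            simpa [List.count_eq_zero] using hmem
          rw [if_neg (by exact_mod_cast hc), hfs2, Finset.insert_eq_self.mpr (by simp [hmem])]
        · have hc : (pvSeg A K.toNat (m + 1)).count A[m - K.toNat] = 0 := List.count_eq_zero.mpr hmem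
          rw [if_pos (by rw [hc]; norm_num), hfs2,
            Finset.card_insert_of_notMem (by simp [hmem]), Nat.cast_add, Nat.cast_one]
          ring
      have hsegwin : pvSeg A K.toNat (m + 1) = (A.drop (m + 1 - K.toNat)).take K.toNat := by
        rw [pvSeg, List.drop_take]
        congr 1
        omega
      refine ⟨(freq.insert A[m] (freq.getD A[m] 0 + 1)).insert A[m - K.toNat]
          ((freq.insert A[m] (freq.getD A[m] 0 + 1)).getD A[m - K.toNat] 0 - 1), ?_, hfreq2⟩
      rw [hy, if_pos hKm, if_pos (show K - 1 ≤ (m : Int) by omega)]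
      dsimp only
      rw [hdist1, hdist2]
      congr 2
      rw [show m + 1 + 1 - K.toNat = (m + 1 - K.toNat) + 1 by omega, List.range_succ,
        List.map_append]
      congr 1
      simp [pvF, hsegwin]
    · -- window still growing: nothing leaves
      have hKnm : m + 1 ≤ K.toNat := by omega
      have hseg1 : pvSeg A K.toNat (m + 1) = pvSeg A K.toNat m ++ [A[m]] := by
        rw [hmid, pvSeg]
        congr 1
        omega
      refine ⟨freq.insert A[m] (freq.getD A[m] 0 + 1), ?_, ?_⟩
      · rw [if_neg hKm]
        dsimp only
        rw [hdist1]
        by_cases hlast : K.toNat = m + 1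
        · rw [if_pos (show K - 1 ≤ (m : Int) by omega)]
          congr 2
          · rw [hseg1]
          · rw [show m + 1 - K.toNat = 0 by omega, show m + 1 + 1 - K.toNat = 1 by omega]
            simp only [List.range_zero, List.map_nil, List.nil_append, List.range_one,
              List.map_cons, List.map_nil]
            congr 1
            rw [← hseg1]
            simp [pvF, pvSeg, ← hlast]
        · rw [if_neg (show ¬ (K - 1 ≤ (m : Int)) by omega)]
          congr 2
          · rw [hseg1]
          · rw [show m + 1 - K.toNat = 0 by omega, show m + 1 + 1 - K.toNat = 0 by omega]
      · intro z
        rw [hseg1]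
        exact hfreq1 z

theorem pvB_eq_spec (A : List Int) (K : Int) :
    SubarrayDistinctCount_alt A K = pvSpec A K := by
  unfold SubarrayDistinctCount_alt pvSpec
  by_cases hK0 : K ≤ 0
  · rw [if_pos hK0]
    have hKn : K.toNat = 0 := by omega
    symm
    rw [List.eq_replicate_iff]
    refine ⟨by simp [PySem.List.length_pyRange_one], ?_⟩
    intro b hb
    obtain ⟨i, hi, rfl⟩ := List.mem_map.mp hb
    simp [hKn]
  · rw [if_neg hK0]
    obtain ⟨freq, hfold, -⟩ := pvB_inv A K (by omega) A.length le_rfl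
    rw [hfold]
    rw [PySem.List.pyRange_one]
    rw [show ((A.length : Int) - K + 1 - 0).toNat = A.length + 1 - K.toNat by omega,
      List.map_map]
    apply List.map_congr_left
    intro k hk
    simp [pvF]

-- ===== VERDICT (by name: the statement is the Claim_ definition above) =====
theorem SubarrayDistinctCount_spec : Claim_equal_SubarrayDistinctCount := by
  intro A K _
  unfold Spec_SubarrayDistinctCount
  rw [pvA_eq_spec, pvB_eq_spec]
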